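-- pv_equiv track=rewrite | github.com/pypi-data/pypi-mirror-397 | packages/cograph-generator/cograph_generator-0.1.0-py3-none-any.whl/cograph_generator/utils.py | _generate_ordered_cartesian_product
-- ===== SOURCE A (Python) =====
-- import itertools
-- from typing import List, Tuple, Iterator
--
-- def _generate_ordered_cartesian_product(groups: List[List[str]]) -> Iterator[Tuple[str, ...]]:
--     """
--     Generate a Cartesian product from a list of groups while collapsing consecutive
--     identical groups to avoid redundant combinations.
--
--     When two or more consecutive groups are identical, they are treated as a
--     single group that allows repeated selections, using combinations-with-replacement
--     to avoid redundant permutations. This is particularly useful when group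
--     structures are symmetric and repeating them would not contribute new results.
--
--     Parameters
--     ----------
--     groups : List[List[str]]
--         A list of groups (lists) where each inner list contains possible options.
--         Consecutive identical groups are collapsed for efficiency.
--
--     Yields
--     ------
--     Tuple[str, ...]
--         Each yielded tuple represents one element of the optimized Cartesian product.
--
--     Examples
--     --------
--     >>> list(_generate_ordered_cartesian_product([["a", "b"], ["a", "b"]]))
--     [('a', 'a'), ('a', 'b'), ('b', 'b')]
--
--     >>> list(_generate_ordered_cartesian_product([["x"], ["y", "z"], ["y", "z"]]))
--     [('x', 'y', 'y'), ('x', 'y', 'z'), ('x', 'z', 'z')]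
--     """
--
--     if not groups:
--         return
--
--     optimized_groups: List[List[Tuple[str, ...]]] = []
--
--     current_group = groups[0]
--     repeat_count = 1
--
--     for next_group in groups[1:] + [None]:
--         if next_group == current_group:
--             repeat_count += 1
--         else:
--             if repeat_count == 1:
--                 optimized_groups.append([(item,) for item in current_group])
--             else:
--                 optimized_groups.append(
--                     list(itertools.combinations_with_replacement(current_group, repeat_count))
--                 )
--
--             current_group = next_group
--             repeat_count = 1
--
--     for combination in itertools.product(*optimized_groups):
--         yield tuple(itertools.chain.from_iterable(combination))
-- ===== SOURCE B (Python) =====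
-- import itertools
--
-- def _rec(groups):
--     if not groups:
--         yield ()
--         return
--     group = groups[0]
--     r = 1
--     while r < len(groups) and groups[r] == group:
--         r += 1
--     if r > 1:
--         combos = itertools.combinations_with_replacement(group, r)
--     else:
--         combos = ((item,) for item in group)
--     rest = groups[r:]
--     for combo in combos:
--         for suffix in _rec(rest):
--             yield combo + suffix
--
-- def _generate_ordered_cartesian_product(groups):
--     if not groups:
--         return
--     yield from _rec(groups)
-- ===== Notes on version B (the rewrite author's own statement) =====
-- stated objective: alternative
-- what changed: Replaced the two-phase design (materialize optimized_groups via a sentinel-terminated run-collapsing loop, then itertools.product + chain.from_iterable flattening) by a direct recursive generator over the run structure that yields combo + suffix, with no intermediate list and no product/chain.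
import Mathlib
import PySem

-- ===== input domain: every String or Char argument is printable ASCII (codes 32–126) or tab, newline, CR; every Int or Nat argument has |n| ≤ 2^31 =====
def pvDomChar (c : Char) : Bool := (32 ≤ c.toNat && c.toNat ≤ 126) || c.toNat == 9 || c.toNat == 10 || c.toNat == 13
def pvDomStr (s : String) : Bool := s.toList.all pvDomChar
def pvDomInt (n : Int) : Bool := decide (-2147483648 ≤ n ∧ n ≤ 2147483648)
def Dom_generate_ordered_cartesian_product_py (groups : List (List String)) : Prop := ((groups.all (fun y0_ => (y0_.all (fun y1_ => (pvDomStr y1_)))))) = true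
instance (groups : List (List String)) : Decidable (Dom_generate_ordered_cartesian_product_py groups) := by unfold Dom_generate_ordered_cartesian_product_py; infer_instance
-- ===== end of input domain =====

-- B is an alternative, structurally different implementation (a recursive generator over the runs
-- of identical consecutive groups, with no intermediate optimized_groups list and no
-- itertools.product); same return values. Tuples yielded by the Pythons are modelled as List String.

-- itertools.combinations_with_replacement pool r, in itertools' order
-- (shared helper: both Pythons call this same library function)
def cwr (pool : List String) (r : Nat) : List (List String) :=
  match r, pool with
  | 0, _ => [[]]
  | _ + 1, [] => []
  | r + 1, x :: t => (cwr (x :: t) r).map (fun c => x :: c) ++ cwr t (r + 1)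
termination_by (r, pool.length)

-- ===== PORT A =====
-- itertools.product(*blocks) in Python's order (first factor varies slowest)
def pyProd : List (List (List String)) → List (List (List String))
  | [] => [[]]
  | b :: bs => b.flatMap (fun c => (pyProd bs).map (fun rest => c :: rest))

-- one iteration of A's run-collapsing loop; state = (optimized_groups, current_group, repeat_count)
def aStep (st : List (List (List String)) × Option (List String) × Nat)
    (next : Option (List String)) : List (List (List String)) × Option (List String) × Nat :=
  if next = st.2.1 then
    (st.1, st.2.1, st.2.2 + 1)
  else
    (st.1 ++ [match st.2.1 with
              | some cg => if st.2.2 = 1 then cg.map (fun x => [x]) else cwr cg st.2.2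
              | none => []  -- unreachable: current_group is none only after the final sentinel
              ],
     next, 1)

def generate_ordered_cartesian_product_py (groups : List (List String)) : List (List String) :=
  match groups with
  | [] => []
  | g0 :: rest =>
    let st := (rest.map some ++ [none]).foldl aStep ([], some g0, 1)
    (pyProd st.1).map List.flatten

-- ===== PORT B =====
-- length of the leading run of elements of rest equal to g (the run length r in Source B is leadRun + 1)
def leadRun (g : List String) : List (List String) → Nat
  | [] => 0
  | h :: t => if h = g then leadRun g t + 1 else 0

def altRec : List (List String) → List (List String)
  | [] => [[]]
  | g :: rest =>
    let k := leadRun g rest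
    let combos := if k = 0 then g.map (fun x => [x]) else cwr g (k + 1)
    combos.flatMap (fun combo => (altRec (rest.drop k)).map (fun suffix => combo ++ suffix))
termination_by gs => gs.length
decreasing_by simp [List.length_drop]

def generate_ordered_cartesian_product_py_alt (groups : List (List String)) : List (List String) :=
  match groups with
  | [] => []
  | _ :: _ => altRec groups

-- ===== PRECONDITION & SPEC =====
def Spec_generate_ordered_cartesian_product_py (groups : List (List String)) (out : List (List String)) : Prop := out = generate_ordered_cartesian_product_py_alt groups
instance (groups : List (List String)) (out : List (List String)) : Decidable (Spec_generate_ordered_cartesian_product_py groups out) := by unfold Spec_generate_ordered_cartesian_product_py; infer_instance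

-- ===== CLAIM (what is proved, stated in full; the proofs are below) =====
def Claim_equal_generate_ordered_cartesian_product_py : Prop := ∀ (groups : List (List String)), Dom_generate_ordered_cartesian_product_py groups → Spec_generate_ordered_cartesian_product_py groups (generate_ordered_cartesian_product_py groups)

-- ===== LEMMAS AND PROOFS =====

-- the block a run of r copies of g contributes
def mkBlock (g : List String) (r : Nat) : List (List String) :=
  if r = 1 then g.map (fun x => [x]) else cwr g r

-- the list of blocks, one per maximal run of identical consecutive groups
def blocks : List (List String) → List (List (List String))
  | [] => []
  | g :: rest => mkBlock g (leadRun g rest + 1) :: blocks (rest.drop (leadRun g rest))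
termination_by gs => gs.length
decreasing_by simp [List.length_drop]

-- A's fold (over the remaining groups wrapped in `some`, plus the `none` sentinel), started with
-- n pending copies of g, appends to the accumulator exactly the blocks of the runs still to come
theorem aFold_blocks (rest : List (List String)) (g : List String) (n : Nat)
    (acc : List (List (List String))) :
    ((rest.map some ++ [none]).foldl aStep (acc, some g, n)).1
      = acc ++ (mkBlock g (n + leadRun g rest) :: blocks (rest.drop (leadRun g rest))) := by
  induction rest generalizing g n acc with
  | nil =>
    simp [aStep, leadRun, mkBlock, blocks]
  | cons h t ih =>
    by_cases hg : h = g
    · subst hg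
      have hs : aStep (acc, some h, n) (some h) = (acc, some h, n + 1) := by simp [aStep]
      have hl : leadRun h (h :: t) = leadRun h t + 1 := by simp [leadRun]
      simp only [List.map_cons, List.cons_append, List.foldl_cons, hs, ih, hl,
        List.drop_succ_cons]
      have harith : n + (leadRun h t + 1) = n + 1 + leadRun h t := by omega
      rw [harith]
    · have hs : aStep (acc, some g, n) (some h) = (acc ++ [mkBlock g n], some h, 1) := by
        simp [aStep, mkBlock, hg]
      have hl : leadRun g (h :: t) = 0 := by simp [leadRun, hg]
      simp only [List.map_cons, List.cons_append, List.foldl_cons, hs, ih, hl,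
        List.drop_zero]
      rw [blocks]
      simp [Nat.add_comm]

-- B's recursion computes the flattened product of the blocks
theorem altRec_blocks (N : Nat) (gs : List (List String)) (hN : gs.length ≤ N) :
    altRec gs = (pyProd (blocks gs)).map List.flatten := by
  induction N generalizing gs with
  | zero =>
    have : gs = [] := by cases gs <;> simp_all
    subst this
    rw [altRec, blocks]
    simp [pyProd]
  | succ N ih =>
    match gs with
    | [] =>
      rw [altRec, blocks]
      simp [pyProd]
    | g :: rest =>
      rw [altRec, blocks]
      have hdrop : (rest.drop (leadRun g rest)).length ≤ N := by
        have := List.length_drop (l := rest) (i := leadRun g rest)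
        simp at hN
        omega
      rw [ih _ hdrop]
      have hblk : (if leadRun g rest = 0 then g.map (fun x => [x]) else cwr g (leadRun g rest + 1))
          = mkBlock g (leadRun g rest + 1) := by
        by_cases h0 : leadRun g rest = 0
        · simp [mkBlock, h0]
        · simp [mkBlock, h0]
      simp only [pyProd, List.map_flatMap, List.map_map, hblk]
      congr 1

-- ===== VERDICT (by name: the statement is the Claim_ definition above) =====
theorem generate_ordered_cartesian_product_py_spec : Claim_equal_generate_ordered_cartesian_product_py := by
  intro groups _
  unfold Spec_generate_ordered_cartesian_product_py
  match groups with
  | [] => rfl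
  | g0 :: rest =>
    show (pyProd ((rest.map some ++ [none]).foldl aStep ([], some g0, 1)).1).map List.flatten
        = altRec (g0 :: rest)
    rw [aFold_blocks, altRec_blocks (g0 :: rest).length _ le_rfl, blocks]
    simp [Nat.add_comm]
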